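-- pv_equiv track=rewrite | github.com/proman3419/AGH-WIET-INF-ASD-2021 | 6/bricks.py | bricks
-- ===== SOURCE A (Python) =====
-- def bricks(A):
--   n = len(A)
--   # F[i] - dlugosc najdluzszego podciagu klockow takiego, ze kazdy klocek zawiera sie
--   # w poprzednich i konczy na klocku i-tym
--   F = [1]*n
--
--   for i in range(1, n):
--     for j in range(i):
--       if A[j][0] <= A[i][0] and A[i][1] <= A[j][1]:
--         F[i] = max(F[i], F[j] + 1)
--
--   return n - max(F)
-- ===== SOURCE B (Python) =====
-- def bricks(A):
--     # Peeling by rounds: repeatedly discard the bricks that have no earlier,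
--     # containing brick still alive; the number of rounds is the longest
--     # nested-in-order chain, and the answer is n minus that.
--     n = len(A)
--     rem = list(range(n))
--     rounds = 0
--     while rem:
--         rounds += 1
--         rem = [i for i in rem
--                if any(j < i and A[j][0] <= A[i][0] and A[i][1] <= A[j][1]
--                       for j in rem)]
--     return n - rounds
-- ===== Notes on version B (the rewrite author's own statement) =====
-- stated objective: alternative
-- what changed: B replaces A's ending-at-i DP over an F array with round-by-round peeling: it repeatedly discards the bricks that have no earlier containing brick still alive, and the number of rounds is the longest chain.
-- outside the precondition, e.g. on bricks([[1, 2], [0]]): A returns 1, B returns 1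
import Mathlib
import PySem

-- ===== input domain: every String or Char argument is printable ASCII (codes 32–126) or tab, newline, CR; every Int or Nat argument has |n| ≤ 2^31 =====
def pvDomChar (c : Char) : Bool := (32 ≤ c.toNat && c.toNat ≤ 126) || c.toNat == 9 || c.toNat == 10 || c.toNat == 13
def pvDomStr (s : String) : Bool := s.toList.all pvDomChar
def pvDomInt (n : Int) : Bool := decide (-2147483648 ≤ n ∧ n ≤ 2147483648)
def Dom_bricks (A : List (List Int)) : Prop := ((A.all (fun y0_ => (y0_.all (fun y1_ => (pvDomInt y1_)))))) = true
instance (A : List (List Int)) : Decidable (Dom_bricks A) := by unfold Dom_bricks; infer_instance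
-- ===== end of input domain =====

-- B replaces the quadratic ending-at-i DP with round-by-round peeling of bricks that
-- have no earlier containing brick left; the number of rounds is the longest chain.

-- ===== PORT A =====
-- A[i][j] for indices that are in range under Pre_bricks (outer index < len(A), inner 0/1 < len(A[i]))
def pvGet2 (A : List (List Int)) (i j : Nat) : Int := (A.getD i []).getD j 0

def bricks (A : List (List Int)) : Int :=
  let n := A.length
  -- F = [1]*n ; for i in range(1, n): for j in range(i): …
  let F := (List.range' 1 (n - 1)).foldl (fun F i =>
      (List.range i).foldl (fun F j =>
        if pvGet2 A j 0 ≤ pvGet2 A i 0 ∧ pvGet2 A i 1 ≤ pvGet2 A j 1 then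
          F.set i (max (F.getD i 0) (F.getD j 0 + 1))
        else F) F) (List.replicate n (1 : Int))
  -- return n - max(F)   (max(F) raises on the empty list; Pre_bricks excludes it)
  (n : Int) - (PySem.List.max? F (fun y => y)).getD 0

-- ===== PORT B =====
-- any(j < i and A[j][0] <= A[i][0] and A[i][1] <= A[j][1] for j in rem)
def pvHasPred (A : List (List Int)) (rem : List Nat) (i : Nat) : Bool :=
  rem.any (fun j => decide (j < i) && decide (pvGet2 A j 0 ≤ pvGet2 A i 0)
                      && decide (pvGet2 A i 1 ≤ pvGet2 A j 1))

-- each round drops at least the smallest surviving index (termination of the while-loop)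
lemma pvPeel_dec (A : List (List Int)) (rem : List Nat) (h : rem ≠ []) :
    (rem.filter (pvHasPred A rem)).length < rem.length := by
  rw [List.length_filter_lt_length_iff_exists]
  obtain ⟨m, hm⟩ : ∃ m, rem.min? = some m := by
    cases rem with
    | nil => simp at h
    | cons x t => exact ⟨_, List.min?_cons⟩
  obtain ⟨hmem, hle⟩ := List.min?_eq_some_iff.mp hm
  refine ⟨m, hmem, ?_⟩
  intro hP
  simp only [pvHasPred, List.any_eq_true, Bool.and_eq_true, decide_eq_true_eq] at hP
  obtain ⟨j, hj, ⟨hlt, _⟩, _⟩ := hP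
  have := hle j hj
  omega

-- the while-loop: keep only bricks with a surviving earlier container, counting rounds
def pvPeel (A : List (List Int)) (rem : List Nat) (rounds : Int) : Int :=
  if rem.isEmpty then rounds
  else pvPeel A (rem.filter (pvHasPred A rem)) (rounds + 1)
termination_by rem.length
decreasing_by
  rename_i hne
  simp only [List.filter_attach, List.length_unattach, List.length_map, List.length_attach]
  exact pvPeel_dec A rem (by simpa [List.isEmpty_iff] using hne)

def bricks_alt (A : List (List Int)) : Int :=
  (A.length : Int) - pvPeel A (List.range A.length) 0

-- ===== PRECONDITION & SPEC =====
-- Pre_ excludes the empty list, on which A raises ValueError (max of an empty sequence), and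
-- multi-brick inputs containing a brick with fewer than 2 entries, on which A (and B) raise
-- IndexError in every shape where that brick is actually compared; the degenerate shapes where
-- short-circuiting skips the bad access are also excluded, and there both programs agree anyway.
def Pre_bricks (A : List (List Int)) : Prop :=
  A ≠ [] ∧ (A.length = 1 ∨ ∀ x ∈ A, 2 ≤ x.length)
instance (A : List (List Int)) : Decidable (Pre_bricks A) := by unfold Pre_bricks; infer_instance

def pvWitness_bricks : List (List Int) := [[0, 3], [1, 2]]

def Spec_bricks (A : List (List Int)) (out : Int) : Prop := out = bricks_alt A
instance (A : List (List Int)) (out : Int) : Decidable (Spec_bricks A out) := by unfold Spec_bricks; infer_instance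

-- ===== CLAIM (what is proved, stated in full; the proofs are below) =====
def Claim_equal_bricks : Prop := ∀ (A : List (List Int)), Dom_bricks A → Pre_bricks A → Spec_bricks A (bricks A)

-- ===== LEMMAS AND PROOFS =====

-- brick j contains brick i (the comparison both programs make)
def pvCnd (A : List (List Int)) (j i : Nat) : Prop :=
  pvGet2 A j 0 ≤ pvGet2 A i 0 ∧ pvGet2 A i 1 ≤ pvGet2 A j 1

-- F[i] of A's DP: longest nested-in-order chain ending at brick i
def pvF (A : List (List Int)) (i : Nat) : Int :=
  1 + ((List.range i).attach.map (fun j =>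
        if pvGet2 A j.1 0 ≤ pvGet2 A i 0 ∧ pvGet2 A i 1 ≤ pvGet2 A j.1 1 then pvF A j.1 else 0)).foldl max 0
termination_by i
decreasing_by exact List.mem_range.mp j.2

lemma pvF_eq (A : List (List Int)) (i : Nat) :
    pvF A i = 1 + ((List.range i).map (fun j => if pvGet2 A j 0 ≤ pvGet2 A i 0 ∧ pvGet2 A i 1 ≤ pvGet2 A j 1 then pvF A j else 0)).foldl max 0 := by
  rw [pvF]
  congr 1
  rw [← List.attach_map_val (l := List.range i)
        (f := fun j => if pvGet2 A j 0 ≤ pvGet2 A i 0 ∧ pvGet2 A i 1 ≤ pvGet2 A j 1 then pvF A j else 0)]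

lemma pvF_pos (A : List (List Int)) (i : Nat) : 1 ≤ pvF A i := by
  rw [pvF_eq]
  have := (PySem.List.le_foldl_max
    ((List.range i).map (fun j => if pvGet2 A j 0 ≤ pvGet2 A i 0 ∧ pvGet2 A i 1 ≤ pvGet2 A j 1 then pvF A j else 0)) (0 : Int)).1
  omega

-- fold-max bracket
lemma lt_foldl_max (l : List Int) (a k : Int) :
    k < l.foldl max a ↔ k < a ∨ ∃ x ∈ l, k < x := by
  induction l generalizing a with
  | nil => simp
  | cons x t ih =>
    rw [List.foldl_cons, ih]
    simp only [lt_max_iff, List.mem_cons]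
    constructor
    · rintro ((h | h) | ⟨y, hy, hk⟩)
      · exact Or.inl h
      · exact Or.inr ⟨x, Or.inl rfl, h⟩
      · exact Or.inr ⟨y, Or.inr hy, hk⟩
    · rintro (h | ⟨y, (rfl | hy), hk⟩)
      · exact Or.inl (Or.inl h)
      · exact Or.inl (Or.inr hk)
      · exact Or.inr ⟨y, hy, hk⟩

-- characterisation of "the chain ending at i is longer than k+1"
lemma pvF_char (A : List (List Int)) (i : Nat) (k : Int) (hk : 0 ≤ k) :
    k + 1 < pvF A i ↔ ∃ j < i, pvCnd A j i ∧ k < pvF A j := by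
  rw [pvF_eq]
  have hshift : ∀ m : Int, k + 1 < 1 + m ↔ k < m := by intro m; omega
  rw [hshift, lt_foldl_max]
  simp only [List.mem_map, List.mem_range]
  constructor
  · rintro (h | ⟨x, ⟨j, hj, rfl⟩, hx⟩)
    · omega
    · by_cases hc : pvGet2 A j 0 ≤ pvGet2 A i 0 ∧ pvGet2 A i 1 ≤ pvGet2 A j 1
      · exact ⟨j, hj, hc, by simpa [hc] using hx⟩
      · simp [hc] at hx; omega
  · rintro ⟨j, hj, hc, hk'⟩
    have hc2 : pvGet2 A j 0 ≤ pvGet2 A i 0 ∧ pvGet2 A i 1 ≤ pvGet2 A j 1 := hc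
    exact Or.inr ⟨if pvGet2 A j 0 ≤ pvGet2 A i 0 ∧ pvGet2 A i 1 ≤ pvGet2 A j 1 then pvF A j else 0,
      ⟨j, hj, rfl⟩, by simpa [hc2] using hk'⟩

-- the maximum of the DP values
def pvM (A : List (List Int)) : Int :=
  ((List.range A.length).map (pvF A)).foldl max 0

lemma pvHasPred_iff (A : List (List Int)) (rem : List Nat) (i : Nat) :
    pvHasPred A rem i = true ↔ ∃ j ∈ rem, j < i ∧ pvCnd A j i := by
  simp [pvHasPred, pvCnd, and_assoc]

-- one peeling round moves the survivor set from threshold r to threshold r+1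
lemma peel_step (A : List (List Int)) (r : Int) (hr : 0 ≤ r) :
    ((List.range A.length).filter (fun i => decide (r < pvF A i))).filter
      (pvHasPred A ((List.range A.length).filter (fun i => decide (r < pvF A i))))
    = (List.range A.length).filter (fun i => decide (r + 1 < pvF A i)) := by
  rw [List.filter_filter]
  apply List.filter_congr
  intro i hi
  rw [Bool.eq_iff_iff]
  simp only [Bool.and_eq_true, decide_eq_true_eq, pvHasPred_iff, List.mem_filter,
    List.mem_range, pvF_char A i r hr]
  constructor
  · rintro ⟨⟨j, ⟨⟨hjn, hrj⟩, hji, hc⟩⟩, _⟩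
    exact ⟨j, hji, hc, hrj⟩
  · rintro ⟨j, hji, hc, hrj⟩
    have hin : i < A.length := List.mem_range.mp hi
    have hFi : r + 1 < pvF A i := (pvF_char A i r hr).mpr ⟨j, hji, hc, hrj⟩
    exact ⟨⟨j, ⟨⟨by omega, by simpa using hrj⟩, hji, hc⟩⟩, by omega⟩

lemma foldl_max_le (l : List Int) (a k : Int) (ha : a ≤ k) (h : ∀ x ∈ l, x ≤ k) :
    l.foldl max a ≤ k := by
  by_contra hc
  rcases (lt_foldl_max l a k).mp (by omega) with h' | ⟨x, hx, h'⟩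
  · omega
  · exact absurd (h x hx) (by omega)

lemma peel_spec_fuel (A : List (List Int)) (len : Nat) :
    ∀ (rem : List Nat) (r : Int), rem.length ≤ len → 0 ≤ r →
    rem = (List.range A.length).filter (fun i => decide (r < pvF A i)) →
    pvPeel A rem r = max r (pvM A) := by
  induction len with
  | zero =>
    intro rem r hlen hr h
    have hemp : rem = [] := List.eq_nil_of_length_eq_zero (by omega)
    subst hemp
    have hpe : pvPeel A [] r = r := by rw [pvPeel.eq_def]; rfl
    rw [hpe]
    have hle : pvM A ≤ r := by
      apply foldl_max_le _ _ _ hr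
      intro x hx
      simp only [List.mem_map, List.mem_range] at hx
      obtain ⟨i, hi, rfl⟩ := hx
      by_contra hc
      have : i ∈ ([] : List Nat) := by
        rw [h]; simp only [List.mem_filter, List.mem_range, decide_eq_true_eq]
        exact ⟨hi, by omega⟩
      simp at this
    exact (max_eq_left hle).symm
  | succ n ih =>
    intro rem r hlen hr h
    by_cases hemp : rem = []
    · subst hemp
      have hpe : pvPeel A [] r = r := by rw [pvPeel.eq_def]; rfl
      rw [hpe]
      have hle : pvM A ≤ r := by
        apply foldl_max_le _ _ _ hr
        intro x hx
        simp only [List.mem_map, List.mem_range] at hx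
        obtain ⟨i, hi, rfl⟩ := hx
        by_contra hc
        have : i ∈ ([] : List Nat) := by
          rw [h]; simp only [List.mem_filter, List.mem_range, decide_eq_true_eq]
          exact ⟨hi, by omega⟩
        simp at this
      exact (max_eq_left hle).symm
    · rw [pvPeel.eq_def, if_neg (by simpa [List.isEmpty_iff] using hemp)]
      have hdec := pvPeel_dec A rem hemp
      have hstep : rem.filter (pvHasPred A rem)
          = (List.range A.length).filter (fun i => decide (r + 1 < pvF A i)) := by
        rw [h]
        exact peel_step A r hr
      rw [ih _ (r + 1) (by omega) (by omega) hstep]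
      obtain ⟨i, hi⟩ := List.exists_mem_of_ne_nil rem hemp
      have hi' := hi
      rw [h, List.mem_filter, List.mem_range] at hi'
      obtain ⟨hin, hri⟩ := hi'
      simp only [decide_eq_true_eq] at hri
      have hM : r + 1 ≤ pvM A := by
        have hmem : pvF A i ∈ (List.range A.length).map (pvF A) := by
          simp only [List.mem_map, List.mem_range]
          exact ⟨i, by simpa using hin, rfl⟩
        have := (PySem.List.le_foldl_max ((List.range A.length).map (pvF A)) (0 : Int)).2
          (pvF A i) hmem
        simp only [pvM]
        omega
      rw [max_eq_right (by omega), max_eq_right (by omega)]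

lemma peel_spec (A : List (List Int)) (rem : List Nat) (r : Int) (hr : 0 ≤ r)
    (h : rem = (List.range A.length).filter (fun i => decide (r < pvF A i))) :
    pvPeel A rem r = max r (pvM A) :=
  peel_spec_fuel A rem.length rem r le_rfl hr h

lemma alt_eq (A : List (List Int)) :
    bricks_alt A = (A.length : Int) - pvM A := by
  unfold bricks_alt
  rw [peel_spec A _ 0 le_rfl]
  · have h0 : (0 : Int) ≤ pvM A :=
      (PySem.List.le_foldl_max ((List.range A.length).map (pvF A)) (0 : Int)).1
    rw [max_eq_right h0]
  · rw [List.filter_eq_self.mpr]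
    intro i _
    simp only [decide_eq_true_eq]
    have := pvF_pos A i
    omega

-- ===== A side =====

def pvFmap (A : List (List Int)) (t : Nat) : List Int :=
  (List.range A.length).map (fun idx => if idx < t then pvF A idx else 1)

lemma inner_fold (A : List (List Int)) (i : Nat) (hi : i < A.length) (m : Nat) (hm : m ≤ i) :
    (List.range m).foldl (fun F j =>
        if pvGet2 A j 0 ≤ pvGet2 A i 0 ∧ pvGet2 A i 1 ≤ pvGet2 A j 1 then
          F.set i (max (F.getD i 0) (F.getD j 0 + 1))
        else F) (pvFmap A i)
    = (pvFmap A i).set i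
        (1 + ((List.range m).map (fun j => if pvGet2 A j 0 ≤ pvGet2 A i 0 ∧ pvGet2 A i 1 ≤ pvGet2 A j 1 then pvF A j else 0)).foldl max 0) := by
  have hlenF : (pvFmap A i).length = A.length := by simp [pvFmap]
  induction m with
  | zero =>
    simp only [List.range_zero, List.foldl_nil, List.map_nil, add_zero]
    have hgi : (pvFmap A i)[i]'(by omega) = 1 := by
      simp [pvFmap]
    conv_lhs => rw [← List.set_getElem_self (as := pvFmap A i) (i := i) (h := by omega)]
    rw [hgi]
  | succ m ih =>
    have hm' : m ≤ i := by omega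
    have hmi : m < i := by omega
    rw [List.range_succ, List.foldl_append, ih hm', List.map_append, List.foldl_append]
    simp only [List.foldl_cons, List.foldl_nil, List.map_cons, List.map_nil]
    set P := 1 + ((List.range m).map (fun j => if pvGet2 A j 0 ≤ pvGet2 A i 0 ∧ pvGet2 A i 1 ≤ pvGet2 A j 1 then pvF A j else 0)).foldl max 0
      with hP
    have hii : i < ((pvFmap A i).set i P).length := by simp [hlenF]; omega
    have hgetd_i : ((pvFmap A i).set i P).getD i 0 = P := by
      rw [List.getD_eq_getElem _ _ (by simp [hlenF]; omega), List.getElem_set, if_pos rfl]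
    have hgetd_m : ((pvFmap A i).set i P).getD m 0 = pvF A m := by
      rw [List.getD_eq_getElem _ _ (by simp [hlenF]; omega), List.getElem_set,
        if_neg (by omega)]
      have hmA : m < A.length := by omega
      simp [pvFmap, hmi]
    have hfold_nonneg : (0 : Int) ≤ ((List.range m).map
        (fun j => if pvGet2 A j 0 ≤ pvGet2 A i 0 ∧ pvGet2 A i 1 ≤ pvGet2 A j 1 then pvF A j else 0)).foldl max 0 :=
      (PySem.List.le_foldl_max _ 0).1
    by_cases hc : pvGet2 A m 0 ≤ pvGet2 A i 0 ∧ pvGet2 A i 1 ≤ pvGet2 A m 1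
    · rw [if_pos hc, hgetd_i, hgetd_m, List.set_set, if_pos hc]
      congr 1
      rw [hP, add_comm (pvF A m) 1, ← max_add_add_left]
    · rw [if_neg hc, if_neg hc]
      congr 1
      rw [hP, max_eq_left hfold_nonneg]

lemma set_Fmap (A : List (List Int)) (i : Nat) (_hi : i < A.length) :
    (pvFmap A i).set i (pvF A i) = pvFmap A (i + 1) := by
  unfold pvFmap
  apply List.ext_getElem
  · simp
  · intro idx h1 h2
    rw [List.getElem_set]
    simp only [List.getElem_map, List.getElem_range]
    by_cases hcase : i = idx
    · subst hcase
      simp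
    · rw [if_neg hcase]
      split_ifs with hlt hlt2
      · rfl
      · omega
      · omega
      · rfl

lemma outer_fold (A : List (List Int)) (k : Nat) (hk : k ≤ A.length - 1) :
    (List.range' 1 k).foldl (fun F i =>
      (List.range i).foldl (fun F j =>
        if pvGet2 A j 0 ≤ pvGet2 A i 0 ∧ pvGet2 A i 1 ≤ pvGet2 A j 1 then
          F.set i (max (F.getD i 0) (F.getD j 0 + 1))
        else F) F) (List.replicate A.length (1 : Int))
    = pvFmap A (k + 1) := by
  induction k with
  | zero =>
    simp only [List.range'_zero, List.foldl_nil]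
    apply List.ext_getElem
    · simp [pvFmap]
    · intro idx h1 h2
      simp only [List.getElem_replicate, pvFmap, List.getElem_map, List.getElem_range]
      by_cases hidx : idx < 1
      · have : idx = 0 := by omega
        subst this
        rw [if_pos (by omega)]
        rw [pvF_eq]
        simp
      · rw [if_neg hidx]
  | succ k ih =>
    have hk' : k ≤ A.length - 1 := by omega
    have hkn : k + 1 < A.length := by omega
    rw [List.range'_1_concat, List.foldl_append, ih hk']
    simp only [List.foldl_cons, List.foldl_nil]
    rw [Nat.add_comm 1 k]
    rw [inner_fold A (k + 1) (by omega) (k + 1) le_rfl, ← pvF_eq, set_Fmap A (k + 1) hkn]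

lemma bricks_eq (A : List (List Int)) (h : A ≠ []) :
    bricks A = (A.length : Int) - pvM A := by
  have hn : 1 ≤ A.length := List.length_pos_of_ne_nil h
  simp only [bricks]
  rw [outer_fold A (A.length - 1) le_rfl]
  have hsub : A.length - 1 + 1 = A.length := by omega
  rw [hsub]
  congr 1
  have hmapeq : pvFmap A A.length = (List.range A.length).map (pvF A) := by
    unfold pvFmap
    apply List.map_congr_left
    intro idx hidx
    rw [if_pos (List.mem_range.mp hidx)]
  rw [hmapeq]
  obtain ⟨m, hm⟩ : ∃ m, A.length = m + 1 := ⟨A.length - 1, by omega⟩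
  rw [hm, List.range_succ_eq_map, List.map_cons, PySem.List.max?_id_cons, Option.getD_some]
  unfold pvM
  rw [hm, List.range_succ_eq_map, List.map_cons, List.foldl_cons]
  rw [max_eq_right (by have := pvF_pos A 0; omega)]

-- ===== VERDICT (by name: the statement is the Claim_ definition above) =====
theorem bricks_spec : Claim_equal_bricks := by
  intro A _ hpre
  unfold Spec_bricks
  rw [bricks_eq A hpre.1, alt_eq A]
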